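-- pv_equiv track=rewrite | github.com/play-iot/iot-vpn | cli/python/src/command/cmd_mac.py | increase
-- ===== SOURCE A (Python) =====
-- def increase(mac: list, idx: int):
--     f0 = mac[idx] + 1
--     mac[idx] = f0
--     if f0 <= 255:
--         return mac
--     mac[idx] = 0
--     up = idx - 1
--     return mac if len(mac) + 1 + up == 0 else increase(mac, up)
-- ===== SOURCE B (Python) =====
-- def increase(mac: list, idx: int):
--     # Same in-place mutation as A; iterative descending scan instead of recursion.
--     n = len(mac)
--     for j in range(idx, -n - 1, -1):
--         if mac[j] < 255:
--             mac[j] = mac[j] + 1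
--             return mac
--         mac[j] = 0
--     return mac
-- ===== Notes on version B (the rewrite author's own statement) =====
-- stated objective: simpler
-- what changed: Replaces A's tail recursion (increment, reset-to-0, quirky termination test len(mac)+1+up==0) by a single for-loop over the precomputed descending index range range(idx, -len(mac)-1, -1) that breaks at the first byte below 255.
import Mathlib
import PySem

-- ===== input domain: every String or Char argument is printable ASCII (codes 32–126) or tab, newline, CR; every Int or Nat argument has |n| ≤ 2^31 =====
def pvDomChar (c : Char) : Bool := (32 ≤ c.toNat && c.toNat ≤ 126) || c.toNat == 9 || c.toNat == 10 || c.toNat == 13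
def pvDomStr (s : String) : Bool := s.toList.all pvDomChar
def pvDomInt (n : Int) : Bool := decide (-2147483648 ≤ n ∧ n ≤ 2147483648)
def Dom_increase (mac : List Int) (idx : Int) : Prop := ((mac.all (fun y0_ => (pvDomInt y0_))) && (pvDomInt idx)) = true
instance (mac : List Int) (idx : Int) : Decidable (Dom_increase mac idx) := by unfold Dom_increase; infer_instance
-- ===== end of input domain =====

-- B replaces A's tail recursion by a for-loop over the descending index range; objective: simpler.
-- Both A and B mutate `mac` in place in Python (the same final mutation); the theorems are about the return value.


-- ===== PORT A =====
-- `mac[idx]` → pyGet? (none = IndexError, junk return outside Pre_); `mac[idx] = v` → pySetD.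
def increase (mac : List Int) (idx : Int) : List Int :=
  match h : PySem.List.pyGet? mac idx with
  | none => mac
  | some v =>
    -- f0 = mac[idx] + 1
    if v + 1 ≤ 255 then PySem.List.pySetD mac idx (v + 1)
    else
      -- mac[idx] = 0; up = idx - 1
      if PySem.List.len (PySem.List.pySetD mac idx 0) + 1 + (idx - 1) = 0
      then PySem.List.pySetD mac idx 0
      else increase (PySem.List.pySetD mac idx 0) (idx - 1)
termination_by (idx + mac.length).toNat
decreasing_by
  have hin : PySem.Raise.InRange mac.length idx := by
    by_contra hc
    rw [← PySem.List.pyGet?_eq_none_iff] at hc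
    simp [hc] at h
  obtain ⟨h1, _⟩ := hin
  simp only [PySem.List.length_pySetD, PySem.List.len_eq] at *
  omega

-- ===== PORT B =====
-- the body of B's for-loop; the `none` branch is the IndexError path (outside Pre_)
def increaseAltLoop (mac : List Int) : List Int → List Int
  | [] => mac
  | j :: js =>
    match PySem.List.pyGet? mac j with
    | none => mac
    | some v =>
      if v < 255 then PySem.List.pySetD mac j (v + 1)
      else increaseAltLoop (PySem.List.pySetD mac j 0) js

def increase_alt (mac : List Int) (idx : Int) : List Int :=
  increaseAltLoop mac (PySem.List.pyRange idx (-(PySem.List.len mac) - 1) (-1))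

-- ===== PRECONDITION & SPEC =====
-- Pre_: exactly where A's first subscript mac[idx] does not raise IndexError (in particular mac ≠ []).
def Pre_increase (mac : List Int) (idx : Int) : Prop := PySem.Raise.InRange mac.length idx
instance (mac : List Int) (idx : Int) : Decidable (Pre_increase mac idx) := by unfold Pre_increase; infer_instance
def pvWitness_increase : List Int × Int := ([254, 255, 255], 2)

def Spec_increase (mac : List Int) (idx : Int) (out : List Int) : Prop := out = increase_alt mac idx
instance (mac : List Int) (idx : Int) (out : List Int) : Decidable (Spec_increase mac idx out) := by unfold Spec_increase; infer_instance

-- ===== CLAIM (what is proved, stated in full; the proofs are below) =====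
def Claim_equal_increase : Prop := ∀ (mac : List Int) (idx : Int), Dom_increase mac idx → Pre_increase mac idx → Spec_increase mac idx (increase mac idx)

-- ===== LEMMAS AND PROOFS =====

-- A's recursion, run alongside the unfolding of B's descending range.
theorem increase_eq_alt (N : Nat) : ∀ (mac : List Int) (idx : Int),
    (idx + mac.length).toNat < N → PySem.Raise.InRange mac.length idx →
    increase mac idx = increase_alt mac idx := by
  induction N with
  | zero => intro mac idx hN _; exact absurd hN (Nat.not_lt_zero _)
  | succ N ih =>
    intro mac idx hN hin
    obtain ⟨h1, h2⟩ := hin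
    rw [increase.eq_def]
    split
    · next h => rw [PySem.List.pyGet?_eq_none_iff] at h; exact absurd ⟨h1, h2⟩ h
    · next v h =>
      have hcons : PySem.List.pyRange idx (-(PySem.List.len mac) - 1) (-1)
          = idx :: PySem.List.pyRange (idx - 1) (-(PySem.List.len mac) - 1) (-1) := by
        apply PySem.List.pyRange_neg_one_cons
        simp only [PySem.List.len_eq]; omega
      unfold increase_alt
      rw [hcons]
      simp only [increaseAltLoop, h]
      by_cases hv255 : v < 255
      · rw [if_pos hv255, if_pos (by omega : v + 1 ≤ 255)]
      · rw [if_neg hv255, if_neg (by omega : ¬ v + 1 ≤ 255)]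
        simp only [PySem.List.len_eq, PySem.List.length_pySetD]
        by_cases hstop : (mac.length : Int) + 1 + (idx - 1) = 0
        · rw [if_pos hstop,
            PySem.List.pyRange_neg_one_eq_nil (by omega : idx - 1 ≤ -(mac.length : Int) - 1)]
          rfl
        · rw [if_neg hstop]
          have hrec := ih (PySem.List.pySetD mac idx 0) (idx - 1)
            (by simp only [PySem.List.length_pySetD]; omega)
            (by simp only [PySem.List.length_pySetD]; exact ⟨by omega, by omega⟩)
          rw [hrec]
          unfold increase_alt
          simp only [PySem.List.len_eq, PySem.List.length_pySetD]

-- ===== VERDICT (by name: the statement is the Claim_ definition above) =====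
theorem increase_spec : Claim_equal_increase := by
  intro mac idx _ hpre
  unfold Spec_increase
  exact increase_eq_alt ((idx + mac.length).toNat + 1) mac idx (Nat.lt_succ_self _) hpre
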